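-- pv_equiv track=rewrite | github.com/Nacho-Cola/coding-test | 프로그래머스/2/131127. 할인 행사/할인 행사.py | solution
-- ===== SOURCE A (Python) =====
-- def solution(want, number, discount):
--     answer = 0
--     for i in range(len(discount)-9):
--         corr = 0
--         day_10 = []
--         dic = {}
--         for k in discount[i:10+i]:
--             day_10.append(k)
--
--         for name in day_10:
--             if name in dic:
--                 dic[name] += 1
--             else:
--                 dic[name] = 1
--
--         for p, name in enumerate(want):
--             if name in dic:
--                 if number[p] == dic[name]:
--                     corr+=1
--         answer += corr // len(want)
--     return answer
-- ===== SOURCE B (Python) =====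
-- def solution(want, number, discount):
--     # Sliding-window: maintain the multiset of the current 10-day window incrementally
--     # instead of rebuilding a list and a counter for every window.
--     n = len(discount)
--     if n < 10:
--         return 0
--     cnt = {}
--     for d in discount[:10]:
--         cnt[d] = cnt.get(d, 0) + 1
--     answer = 0
--     i = 0
--     while True:
--         if all(cnt.get(name) == number[p] for p, name in enumerate(want)):
--             answer += 1
--         if i + 10 >= n:
--             break
--         out = discount[i]
--         c = cnt[out] - 1
--         if c == 0:
--             del cnt[out]
--         else:
--             cnt[out] = c
--         item = discount[i + 10]
--         cnt[item] = cnt.get(item, 0) + 1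
--         i += 1
--     return answer
-- ===== Notes on version B (the rewrite author's own statement) =====
-- stated objective: faster
-- what changed: A rebuilds a 10-element slice copy and a fresh counter dict for every window; B maintains one sliding multiset across windows, adding/removing one element per step, and checks the want items directly against it.
-- outside the precondition, e.g. on solution(['a', 'b'], [1], ['x', 'x', 'x', 'x', 'x', 'x', 'x', 'x', 'x', 'x']): A returns 0, B returns 0
import Mathlib
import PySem

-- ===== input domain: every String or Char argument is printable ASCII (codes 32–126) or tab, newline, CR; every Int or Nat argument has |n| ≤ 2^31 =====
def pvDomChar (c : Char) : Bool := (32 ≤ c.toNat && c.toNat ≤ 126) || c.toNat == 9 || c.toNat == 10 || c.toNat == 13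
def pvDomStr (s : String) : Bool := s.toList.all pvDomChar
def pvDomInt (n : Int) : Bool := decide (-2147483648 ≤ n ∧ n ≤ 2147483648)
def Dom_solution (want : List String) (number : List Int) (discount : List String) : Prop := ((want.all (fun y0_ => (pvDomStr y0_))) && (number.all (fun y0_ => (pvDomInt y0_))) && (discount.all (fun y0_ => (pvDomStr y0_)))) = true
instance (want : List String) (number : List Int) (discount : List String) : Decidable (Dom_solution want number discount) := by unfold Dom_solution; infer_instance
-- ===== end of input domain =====

-- B replaces A's per-window rebuild (slice copy + fresh counter per window) by one sliding
-- multiset maintained incrementally across windows; objective: faster (constant factor).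

-- ===== PORT A =====
def solution (want : List String) (number : List Int) (discount : List String) : Int :=
  (PySem.List.pyRange 0 ((discount.length : Int) - 9) 1).foldl (fun answer i =>
    let day10 : List String :=
      (PySem.List.slice discount (some i) (some (10 + i))).foldl (fun acc k => acc ++ [k]) []
    let dic : PySem.Dict String Int :=
      day10.foldl (fun dic name =>
        if dic.contains name then dic.modify name 0 (· + 1) else dic.insert name 1)
        PySem.Dict.empty
    let corr : Int :=
      (PySem.List.enumerate want 0).foldl (fun corr pn =>
        if dic.contains pn.2 then
          (if PySem.List.pyGetD number pn.1 0 = dic.getD pn.2 0 then corr + 1 else corr)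
        else corr) 0
    answer + PySem.Int.floordiv corr (want.length : Int)) 0

-- ===== PORT B =====
def solAltCheck (want : List String) (number : List Int) (cnt : PySem.Dict String Int) : Bool :=
  (PySem.List.enumerate want 0).all
    (fun pn => cnt.get? pn.2 == some (PySem.List.pyGetD number pn.1 0))

def solAltLoop (want : List String) (number : List Int) (discount : List String)
    (rem i : Nat) (cnt : PySem.Dict String Int) (answer : Int) : Int :=
  let answer' := if solAltCheck want number cnt then answer + 1 else answer
  match rem with
  | 0 => answer'
  | rem' + 1 =>
    let out := PySem.List.pyGetD discount (i : Int) ""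
    let c := cnt.getD out 0 - 1
    let cnt' := if c = 0 then cnt.erase out else cnt.insert out c
    let item := PySem.List.pyGetD discount ((i : Int) + 10) ""
    let cnt'' := cnt'.modify item 0 (· + 1)
    solAltLoop want number discount rem' (i + 1) cnt'' answer'

def solution_alt (want : List String) (number : List Int) (discount : List String) : Int :=
  if (discount.length : Int) < 10 then 0
  else
    let cnt := (PySem.List.slice discount none (some (10 : Int))).foldl
      (fun cnt d => cnt.modify d 0 (· + 1)) PySem.Dict.empty
    solAltLoop want number discount (discount.length - 10) 0 cnt 0

-- ===== PRECONDITION & SPEC =====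
-- Pre_ excludes (a) want = [] while discount has ≥ 10 days, where A raises ZeroDivisionError,
-- and (b) want longer than number with ≥ 10 days, where A raises IndexError whenever some
-- uncovered want item occurs in discount (and returns only in the accidental case that none does).
def Pre_solution (want : List String) (number : List Int) (discount : List String) : Prop :=
  discount.length < 10 ∨ (want ≠ [] ∧ want.length ≤ number.length)
instance (want : List String) (number : List Int) (discount : List String) : Decidable (Pre_solution want number discount) := by unfold Pre_solution; infer_instance
def pvWitness_solution : List String × List Int × List String :=
  (["a"], [1], ["a", "b", "a", "a", "c", "a", "b", "b", "a", "c", "a"])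
def Spec_solution (want : List String) (number : List Int) (discount : List String) (out : Int) : Prop := out = solution_alt want number discount
instance (want : List String) (number : List Int) (discount : List String) (out : Int) : Decidable (Spec_solution want number discount out) := by unfold Spec_solution; infer_instance

-- ===== CLAIM (what is proved, stated in full; the proofs are below) =====
def Claim_equal_solution : Prop := ∀ (want : List String) (number : List Int) (discount : List String), Dom_solution want number discount → Pre_solution want number discount → Spec_solution want number discount (solution want number discount)

-- ===== LEMMAS AND PROOFS =====

-- the 10-day window starting at day i
def wext (discount : List String) (i : Nat) : List String := (discount.drop i).take 10
-- the count a Python dict counter of the window reports for s (none = key absent)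
def optCnt (w : List String) (s : String) : Option Int :=
  if w.count s = 0 then none else some ((w.count s : Nat) : Int)
-- the per-window match test, phrased on the window itself
def chk (want : List String) (number : List Int) (w : List String) : Bool :=
  (PySem.List.enumerate want 0).all
    (fun pn => optCnt w pn.2 == some (PySem.List.pyGetD number pn.1 0))
def ind (want : List String) (number : List Int) (w : List String) : Int :=
  if chk want number w then 1 else 0

lemma dict_get?_eq (d : PySem.Dict String Int) (k : String) :
    d.get? k = if d.contains k = true then some (d.getD k 0) else none := by
  cases h : d.get? k with
  | none => simp [PySem.Dict.contains_eq_isSome_get?, h]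
  | some v => simp [PySem.Dict.contains_eq_isSome_get?, h, PySem.Dict.getD_eq_get?_getD]

lemma get?_counter (w : List String) (s : String) :
    (PySem.Dict.counter w).get? s = optCnt w s := by
  rw [dict_get?_eq]
  simp only [PySem.Dict.contains_counter, PySem.Dict.getD_counter, optCnt]
  by_cases h : w.count s = 0
  · simp [h]
    intro hm
    exact absurd (List.count_pos_iff.mpr hm) (by omega)
  · simp [h]
    exact List.count_pos_iff.mp (by omega)

lemma dicOf_eq_counter (w : List String) :
    w.foldl (fun d name =>
      if d.contains name then d.modify name 0 (· + 1) else d.insert name 1)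
      PySem.Dict.empty = PySem.Dict.counter w := by
  rw [PySem.Dict.counter_eq_foldl]
  congr 1
  funext d name
  by_cases h : d.contains name = true
  · simp [h]
  · have h0 : d.getD name 0 = 0 :=
      PySem.Dict.getD_of_not_contains (d := d) (k := name) 0 (by simpa using h)
    simp [h, PySem.Dict.modify, h0]

lemma get?_erase (d : PySem.Dict String Int) (k k' : String) :
    (d.erase k).get? k' = if k' = k then none else d.get? k' := by
  obtain ⟨items⟩ := d
  simp only [PySem.Dict.erase, PySem.Dict.get?]
  by_cases hk : k' = k
  · subst hk
    rw [if_pos rfl]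
    have : List.find? (fun p => p.1 == k') (List.filter (fun p : String × Int => !p.1 == k') items) = none := by
      rw [List.find?_eq_none]
      intro x hx
      have := (List.mem_filter.mp hx).2
      simpa using this
    simp [this]
  · rw [if_neg hk]
    induction items with
    | nil => simp
    | cons p t ih =>
      by_cases h1 : p.1 = k
      · have b : (p.1 == k') = false := beq_eq_false_iff_ne.mpr (by rw [h1]; exact fun he => hk he.symm)
        have b1 : (!(p.1 == k)) = false := by simp [h1]
        simp only [List.filter_cons, b1]
        simp only [Bool.false_eq_true, if_false, List.find?_cons, b, cond_false]
        exact ih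
      · have b1 : (!(p.1 == k)) = true := by simpa using h1
        by_cases h2 : p.1 = k'
        · have b2 : (p.1 == k') = true := by simpa using h2
          simp [b1, b2]
        · have b2 : (p.1 == k') = false := beq_eq_false_iff_ne.mpr h2
          simp only [List.filter_cons, b1, if_true, List.find?_cons, b2, cond_false]
          exact ih

lemma get?_modify (d : PySem.Dict String Int) (k k' : String) (f : Int → Int) :
    (d.modify k 0 f).get? k' = if k' = k then some (f (d.getD k 0)) else d.get? k' := by
  simp [PySem.Dict.modify, PySem.Dict.get?_insert]

-- A's contribution of one window equals the indicator of that window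
lemma Awin (want : List String) (number : List Int) (w : List String) (hW : want ≠ [])
    (dic : PySem.Dict String Int) (hdic : dic = PySem.Dict.counter w) :
    PySem.Int.floordiv
      ((PySem.List.enumerate want 0).foldl (fun corr pn =>
        if dic.contains pn.2 then
          (if PySem.List.pyGetD number pn.1 0 = dic.getD pn.2 0 then corr + 1 else corr)
        else corr) 0)
      (want.length : Int) = ind want number w := by
  subst hdic
  have hfun : (fun (corr : Int) (pn : Int × String) =>
      if (PySem.Dict.counter w).contains pn.2 then
        (if PySem.List.pyGetD number pn.1 0 = (PySem.Dict.counter w).getD pn.2 0 then corr + 1 else corr)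
      else corr)
      = (fun corr pn =>
        if (optCnt w pn.2 == some (PySem.List.pyGetD number pn.1 0)) = true then corr + 1 else corr) := by
    funext corr pn
    have hg := get?_counter w pn.2
    rw [dict_get?_eq] at hg
    by_cases hc : (PySem.Dict.counter w).contains pn.2 = true
    · rw [if_pos hc]
      rw [if_pos hc] at hg
      by_cases he : PySem.List.pyGetD number pn.1 0 = (PySem.Dict.counter w).getD pn.2 0
      · rw [if_pos he]
        rw [if_pos (show (optCnt w pn.2 == some (PySem.List.pyGetD number pn.1 0)) = true from by
          rw [← hg]; exact beq_iff_eq.mpr (by rw [he]))]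
      · rw [if_neg (show ¬ (optCnt w pn.2 == some (PySem.List.pyGetD number pn.1 0)) = true from by
          rw [← hg]
          simp only [beq_iff_eq, Option.some.injEq]
          exact fun h => he h.symm)]
        rw [if_neg he]
    · rw [if_neg hc]
      rw [if_neg hc] at hg
      rw [if_neg (show ¬ (optCnt w pn.2 == some (PySem.List.pyGetD number pn.1 0)) = true from by
        rw [← hg]; simp)]
  rw [hfun]
  rw [PySem.List.foldl_if_add_one
    (fun pn : Int × String => optCnt w pn.2 == some (PySem.List.pyGetD number pn.1 0))]
  rw [show ((0 : Int) + ((List.countP (fun pn : Int × String => optCnt w pn.2 == some (PySem.List.pyGetD number pn.1 0)) (PySem.List.enumerate want 0)) : Nat) : Int) = (((List.countP (fun pn : Int × String => optCnt w pn.2 == some (PySem.List.pyGetD number pn.1 0)) (PySem.List.enumerate want 0)) : Nat) : Int) from by ring]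
  rw [PySem.Int.floordiv_natCast]
  unfold ind chk
  have hlen : (PySem.List.enumerate want 0).length = want.length := by
    simpa using PySem.List.length_enumerate want 0
  by_cases hall : (PySem.List.enumerate want 0).all
      (fun pn => optCnt w pn.2 == some (PySem.List.pyGetD number pn.1 0)) = true
  · rw [if_pos hall]
    have : List.countP (fun pn : Int × String => optCnt w pn.2 == some (PySem.List.pyGetD number pn.1 0)) (PySem.List.enumerate want 0) = want.length := by
      rw [← hlen]
      exact List.countP_eq_length.mpr (by simpa [List.all_eq_true] using hall)
    rw [this]
    rw [Nat.div_self (by cases want with | nil => exact absurd rfl hW | cons a l => simp)]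
    norm_num
  · rw [if_neg hall]
    have hlt : List.countP (fun pn : Int × String => optCnt w pn.2 == some (PySem.List.pyGetD number pn.1 0)) (PySem.List.enumerate want 0) < want.length := by
      rw [← hlen]
      rcases Nat.lt_or_ge (List.countP _ _) _ with h | h
      · exact h
      · exfalso
        have := Nat.le_antisymm List.countP_le_length h
        exact hall (by simpa [List.all_eq_true] using List.countP_eq_length.mp this)
    rw [Nat.div_eq_of_lt hlt]
    norm_num

lemma check_congr (want : List String) (number : List Int) (cnt : PySem.Dict String Int)
    (w : List String) (hP : ∀ s, cnt.get? s = optCnt w s) :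
    solAltCheck want number cnt = chk want number w := by
  unfold solAltCheck chk
  congr 1
  funext pn
  rw [hP]

-- B's loop: invariant + accumulated sum of indicators
lemma loop_eq (want : List String) (number : List Int) (discount : List String) :
    ∀ (rem i : Nat) (cnt : PySem.Dict String Int) (answer : Int),
      i + 10 + rem = discount.length →
      (∀ s, cnt.get? s = optCnt (wext discount i) s) →
      solAltLoop want number discount rem i cnt answer
        = answer + ((List.range (rem + 1)).map
            (fun j => ind want number (wext discount (i + j)))).sum := by
  intro rem
  induction rem with
  | zero =>
    intro i cnt answer hn hP
    rw [solAltLoop, check_congr want number cnt _ hP]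
    unfold ind
    by_cases h : chk want number (wext discount i) = true <;>
      simp [h, List.range_succ]
  | succ rem' ih =>
    intro i cnt answer hn hP
    have hlt : i + 10 < discount.length := by omega
    have hi : i < discount.length := by omega
    have hout : PySem.List.pyGetD discount (i : Int) "" = discount[i] := by
      rw [PySem.List.pyGetD_natCast]
      simp [List.getD_eq_getElem?_getD, List.getElem?_eq_getElem hi]
    have hitem : PySem.List.pyGetD discount ((i : Int) + 10) "" = discount[i + 10] := by
      rw [show ((i : Int) + 10) = ((i + 10 : Nat) : Int) by push_cast; ring]
      rw [PySem.List.pyGetD_natCast]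
      simp [List.getD_eq_getElem?_getD, List.getElem?_eq_getElem hlt]
    set mid : List String := (discount.drop (i+1)).take 9 with hmid
    have hw1 : wext discount i = discount[i] :: mid := by
      unfold wext
      rw [List.drop_eq_getElem_cons hi, show (10:Nat) = 9 + 1 from rfl, List.take_succ_cons]
    have hw2 : wext discount (i+1) = mid ++ [discount[i+10]] := by
      unfold wext
      conv_lhs => rw [show (10:Nat) = 9 + 1 from rfl, List.take_succ]
      congr 1
      rw [List.getElem?_drop]
      rw [List.getElem?_eq_getElem (by omega : i + 1 + 9 < discount.length)]
      simp [show i + 1 + 9 = i + 10 by omega]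
    -- the amount stored for the leaving element
    have hcnt_out : cnt.getD discount[i] 0 = ((mid.count discount[i] : Nat) : Int) + 1 := by
      rw [PySem.Dict.getD_eq_get?_getD, hP]
      unfold optCnt
      rw [hw1]
      rw [if_neg (by simp [List.count_cons])]
      simp [List.count_cons]
    -- invariant after removing the leaving element
    have hPmid : ∀ s,
        (if cnt.getD discount[i] 0 - 1 = 0 then cnt.erase discount[i]
         else cnt.insert discount[i] (cnt.getD discount[i] 0 - 1)).get? s = optCnt mid s := by
      intro s
      by_cases hc0 : cnt.getD discount[i] 0 - 1 = 0
      · rw [if_pos hc0, get?_erase]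
        by_cases hs : s = discount[i]
        · rw [if_pos hs]
          unfold optCnt
          subst hs
          rw [if_pos (by omega)]
        · rw [if_neg hs, hP]
          unfold optCnt
          rw [hw1]
          have hs' : ¬ discount[i] = s := fun h => hs h.symm
          simp [List.count_cons, hs, hs']
      · rw [if_neg hc0, PySem.Dict.get?_insert]
        by_cases hs : s = discount[i]
        · rw [if_pos hs]
          unfold optCnt
          subst hs
          rw [if_neg (by omega)]
          rw [hcnt_out]
          norm_num
        · rw [if_neg hs, hP]
          unfold optCnt
          rw [hw1]
          have hs' : ¬ discount[i] = s := fun h => hs h.symm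
          simp [List.count_cons, hs, hs']
    -- the stored amount for the entering element, on the shrunk window
    have hmid_item : (if cnt.getD discount[i] 0 - 1 = 0 then cnt.erase discount[i]
         else cnt.insert discount[i] (cnt.getD discount[i] 0 - 1)).getD discount[i+10] 0
        = ((mid.count discount[i+10] : Nat) : Int) := by
      rw [PySem.Dict.getD_eq_get?_getD, hPmid]
      unfold optCnt
      by_cases h0 : mid.count discount[i+10] = 0
      · simp [h0]
      · simp [h0]
    -- invariant after adding the entering element
    have hPnew : ∀ s,
        ((if cnt.getD discount[i] 0 - 1 = 0 then cnt.erase discount[i]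
          else cnt.insert discount[i] (cnt.getD discount[i] 0 - 1)).modify discount[i+10] 0
          (· + 1)).get? s = optCnt (wext discount (i+1)) s := by
      intro s
      rw [get?_modify]
      by_cases hs : s = discount[i+10]
      · rw [if_pos hs, hmid_item]
        unfold optCnt
        subst hs
        rw [hw2]
        rw [if_neg (by simp [List.count_append])]
        simp [List.count_append]
      · rw [if_neg hs, hPmid]
        unfold optCnt
        rw [hw2]
        have hs' : ¬ discount[i+10] = s := fun h => hs h.symm
        simp [List.count_append, hs, hs']
    -- unfold one loop step and use the induction hypothesis
    rw [solAltLoop]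
    simp only [hout, hitem]
    rw [check_congr want number cnt _ hP]
    rw [ih (i+1) _ _ (by omega) hPnew]
    -- re-index the sum
    have hsum : ((List.range (rem' + 1 + 1)).map
        (fun j => ind want number (wext discount (i + j)))).sum
        = ind want number (wext discount i)
          + ((List.range (rem' + 1)).map
              (fun j => ind want number (wext discount (i + 1 + j)))).sum := by
      rw [List.range_succ_eq_map]
      simp only [List.map_cons, List.map_map, List.sum_cons, Nat.add_zero]
      congr 1
      congr 1
      apply List.map_congr_left
      intro j _
      simp only [Function.comp_apply]
      rw [show i + Nat.succ j = i + 1 + j by omega]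
    rw [hsum]
    unfold ind
    by_cases h : chk want number (wext discount i) = true <;> simp [h] <;> ring_nf
-- ===== VERDICT (by name: the statement is the Claim_ definition above) =====
theorem solution_spec : Claim_equal_solution := by
  intro want number discount hDom hPre
  unfold Spec_solution
  by_cases hn : discount.length < 10
  · have hA : solution want number discount = 0 := by
      unfold solution
      rw [PySem.List.pyRange_one_eq_nil (by omega)]
      rfl
    have hB : solution_alt want number discount = 0 := by
      unfold solution_alt
      rw [if_pos (by exact_mod_cast Nat.cast_lt.mpr hn)]
    rw [hA, hB]
  · have hW : want ≠ [] := by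
      rcases hPre with h | ⟨h1, _⟩
      · exact absurd h hn
      · exact h1
    have h10 : 10 ≤ discount.length := by omega
    -- B side
    have hB : solution_alt want number discount
        = 0 + ((List.range (discount.length - 9)).map
            (fun j => ind want number (wext discount j))).sum := by
      unfold solution_alt
      rw [if_neg (by omega)]
      have hsl : PySem.List.slice discount none (some (10:Int)) = discount.take 10 := by
        simp [PySem.List.slice_to]
      simp only [hsl, ← PySem.Dict.counter_eq_foldl]
      rw [loop_eq want number discount (discount.length - 10) 0 _ 0 (by omega)
        (by intro s; rw [get?_counter]; unfold wext; rw [List.drop_zero])]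
      rw [show discount.length - 10 + 1 = discount.length - 9 from by omega]
      simp only [Nat.zero_add]
    -- A side
    have hA : solution want number discount
        = 0 + ((List.range (discount.length - 9)).map
            (fun k => ind want number (wext discount k))).sum := by
      unfold solution
      rw [PySem.List.foldl_add]
      congr 1
      rw [PySem.List.pyRange_one]
      rw [show ((discount.length : Int) - 9 - 0).toNat = discount.length - 9 by omega]
      rw [List.map_map]
      congr 1
      apply List.map_congr_left
      intro k _
      simp only [Function.comp_apply, zero_add]
      rw [show ((10 : Int) + (k : Int)) = ((10 + k : Nat) : Int) by push_cast; ring]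
      rw [PySem.List.slice_natCast discount k (10 + k)]
      rw [show 10 + k - k = 10 by omega]
      rw [PySem.List.foldl_append_singleton, List.nil_append]
      exact Awin want number _ hW _ (dicOf_eq_counter _)
    rw [hA, hB]
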